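-- pv_equiv track=rewrite | github.com/yuerugong/script-to-detect-various-structures-of-data-and-format | useless code/Google_api.py | extract_social_media_links
-- ===== SOURCE A (Python) =====
-- def extract_social_media_links(search_results):
--     """
--     Extract Facebook and Instagram links from Google search results.
--     """
--     facebook_link = None
--     instagram_link = None
--
--     if search_results:
--         for item in search_results.get('items', []):
--             link = item.get('link', '')
--             if 'facebook.com' in link and not facebook_link:
--                 facebook_link = link
--             if 'instagram.com' in link and not instagram_link:
--                 instagram_link = link
--
--             # Exit early if both links are found
--             if facebook_link and instagram_link:
--                 break
--
--     return facebook_link, instagram_link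
-- ===== SOURCE B (Python) =====
-- def extract_social_media_links(search_results):
--     """
--     Extract Facebook and Instagram links from Google search results.
--     """
--     items = search_results.get('items', []) if search_results else []
--     facebook_link = next((item.get('link', '') for item in items
--                           if 'facebook.com' in item.get('link', '')), None)
--     instagram_link = next((item.get('link', '') for item in items
--                            if 'instagram.com' in item.get('link', '')), None)
--     return facebook_link, instagram_link
-- ===== Notes on version B (the rewrite author's own statement) =====
-- stated objective: simpler
-- what changed: Replaces the single stateful loop with early break and cross-link flags by two independent first-match searches (next over a generator), maintaining no mutable state.
import Mathlib
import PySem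

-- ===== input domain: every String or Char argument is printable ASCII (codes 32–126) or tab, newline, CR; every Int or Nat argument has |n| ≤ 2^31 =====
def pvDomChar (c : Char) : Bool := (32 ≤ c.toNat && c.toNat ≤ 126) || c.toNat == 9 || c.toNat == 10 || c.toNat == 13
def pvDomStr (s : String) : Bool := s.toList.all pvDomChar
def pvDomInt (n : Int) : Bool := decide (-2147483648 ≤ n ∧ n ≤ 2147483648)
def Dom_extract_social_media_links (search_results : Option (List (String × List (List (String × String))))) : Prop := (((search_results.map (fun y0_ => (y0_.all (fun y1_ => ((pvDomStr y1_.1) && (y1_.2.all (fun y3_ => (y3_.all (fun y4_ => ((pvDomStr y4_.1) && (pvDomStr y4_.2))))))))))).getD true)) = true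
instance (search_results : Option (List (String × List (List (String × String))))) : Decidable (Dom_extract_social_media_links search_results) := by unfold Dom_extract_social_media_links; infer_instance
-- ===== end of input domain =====

-- B replaces A's single stateful loop (flags + early break) by two independent first-match searches; objective: simpler.


-- ===== PORT A =====
-- Python truthiness of a `facebook_link` / `instagram_link` variable (None and '' are falsy)
def pvTruthy : Option String → Bool
  | none => false
  | some s => !(s == "")

-- item.get('link', '') on an association-list dict (first match)
def pvLink (item : List (String × String)) : String :=
  ((item.lookup "link").getD "")

-- the for-loop of A: carries both link variables, breaks early when both are truthy
def loopA : List (List (String × String)) → Option String → Option String → Option String × Option String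
  | [], fb, ig => (fb, ig)
  | item :: rest, fb, ig =>
    let link := pvLink item
    let fb' := if PySem.Str.isIn "facebook.com" link && !(pvTruthy fb) then some link else fb
    let ig' := if PySem.Str.isIn "instagram.com" link && !(pvTruthy ig) then some link else ig
    if pvTruthy fb' && pvTruthy ig' then (fb', ig') else loopA rest fb' ig'

def extract_social_media_links (search_results : Option (List (String × List (List (String × String))))) : Option String × Option String :=
  match search_results with
  | none => (none, none)
  | some d =>
    if d = [] then (none, none)   -- `if search_results:` — an empty dict is falsy
    else loopA ((d.lookup "items").getD []) none none

-- ===== PORT B =====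
-- next((item.get('link', '') for item in items if needle in item.get('link', '')), None)
def findLink (needle : String) (items : List (List (String × String))) : Option String :=
  match items.find? (fun item => PySem.Str.isIn needle (pvLink item)) with
  | some item => some (pvLink item)
  | none => none

def extract_social_media_links_alt (search_results : Option (List (String × List (List (String × String))))) : Option String × Option String :=
  let items := match search_results with
    | none => []
    | some d => if d = [] then [] else ((d.lookup "items").getD [])
  (findLink "facebook.com" items, findLink "instagram.com" items)

-- ===== PRECONDITION & SPEC =====
def Spec_extract_social_media_links (search_results : Option (List (String × List (List (String × String))))) (out : Option String × Option String) : Prop := out = extract_social_media_links_alt search_results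
instance (search_results : Option (List (String × List (List (String × String))))) (out : Option String × Option String) : Decidable (Spec_extract_social_media_links search_results out) := by unfold Spec_extract_social_media_links; infer_instance

-- ===== CLAIM (what is proved, stated in full; the proofs are below) =====
def Claim_equal_extract_social_media_links : Prop := ∀ (search_results : Option (List (String × List (List (String × String))))), Dom_extract_social_media_links search_results → Spec_extract_social_media_links search_results (extract_social_media_links search_results)

-- ===== LEMMAS AND PROOFS =====

lemma pvTruthy_none : pvTruthy none = false := rfl
lemma pvTruthy_some (s : String) : pvTruthy (some s) = !(s == "") := rfl

-- a string containing a nonempty needle is nonempty (hence truthy)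
lemma link_ne {needle s : String} (hne : needle.toList ≠ []) (h : PySem.Str.isIn needle s = true) :
    (s == "") = false := by
  rw [beq_eq_false_iff_ne]
  rintro rfl
  rcases (PySem.Str.isIn_iff_infix _ _).1 h with ⟨pre, suf, hps⟩
  apply hne
  have h0 : pre ++ needle.toList ++ suf = ([] : List Char) := hps
  rcases List.append_eq_nil_iff.1 h0 with ⟨h1, -⟩
  exact (List.append_eq_nil_iff.1 h1).2

lemma findLink_cons (n : String) (item : List (String × String)) (rest : List (List (String × String))) :
    findLink n (item :: rest) =
      if PySem.Str.isIn n (pvLink item) then some (pvLink item) else findLink n rest := by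
  simp only [findLink, List.find?_cons]
  rcases hc : PySem.Chars.isIn n.toList (pvLink item).toList <;> simp [PySem.Str.isIn, hc]

-- invariant: each link variable is None or truthy; the loop computes the two independent first matches
lemma loopA_spec : ∀ (items : List (List (String × String))) (fb ig : Option String),
    (fb = none ∨ pvTruthy fb = true) → (ig = none ∨ pvTruthy ig = true) →
    loopA items fb ig =
      ((if pvTruthy fb then fb else findLink "facebook.com" items),
       (if pvTruthy ig then ig else findLink "instagram.com" items)) := by
  intro items
  induction items with
  | nil =>
    intro fb ig hfb hig
    rcases hfb with rfl | hfb <;> rcases hig with rfl | hig <;>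
      simp_all [loopA, findLink, pvTruthy_none]
  | cons item rest ih =>
    intro fb ig hfb hig
    rw [findLink_cons, findLink_cons]
    simp only [loopA]
    by_cases hf : PySem.Str.isIn "facebook.com" (pvLink item) = true
    · have hfe := link_ne (needle := "facebook.com") (by decide) hf
      by_cases hg : PySem.Str.isIn "instagram.com" (pvLink item) = true
      · have hge := link_ne (needle := "instagram.com") (by decide) hg
        rcases hfb with rfl | hfb <;> rcases hig with rfl | hig <;>
          simp_all [pvTruthy_none, pvTruthy_some, ih]
      · rcases hfb with rfl | hfb <;> rcases hig with rfl | hig <;>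
          simp_all [pvTruthy_none, pvTruthy_some, ih]
    · by_cases hg : PySem.Str.isIn "instagram.com" (pvLink item) = true
      · have hge := link_ne (needle := "instagram.com") (by decide) hg
        rcases hfb with rfl | hfb <;> rcases hig with rfl | hig <;>
          simp_all [pvTruthy_none, pvTruthy_some, ih]
      · rcases hfb with rfl | hfb <;> rcases hig with rfl | hig <;>
          simp_all [pvTruthy_none, pvTruthy_some, ih]

-- ===== VERDICT (by name: the statement is the Claim_ definition above) =====
theorem extract_social_media_links_spec : Claim_equal_extract_social_media_links := by
  intro sr _
  unfold Spec_extract_social_media_links extract_social_media_links extract_social_media_links_alt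
  match sr with
  | none => simp [findLink]
  | some d =>
    by_cases hd : d = [] <;>
      simp [hd, findLink, loopA_spec _ none none (Or.inl rfl) (Or.inl rfl), pvTruthy_none]
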